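-- pv_equiv track=rewrite | github.com/meistro57/omnidev-supreme | backend/agents/village/guardian_agent.py | _determine_security_action
-- ===== SOURCE A (Python) =====
-- def _determine_security_action(content: str) -> str:
--     """Determine the specific security action needed"""
--     content_lower = content.lower()
--
--     if any(word in content_lower for word in ["threat", "attack", "malware", "intrusion"]):
--         return "threat_detection"
--     elif any(word in content_lower for word in ["vulnerability", "weakness", "flaw", "exploit"]):
--         return "vulnerability_assessment"
--     elif any(word in content_lower for word in ["access", "permission", "authorization", "authentication"]):
--         return "access_control"
--     elif any(word in content_lower for word in ["compliance", "regulation", "standard", "audit"]):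
--         return "compliance_check"
--     elif any(word in content_lower for word in ["incident", "breach", "emergency", "response"]):
--         return "incident_response"
--     elif any(word in content_lower for word in ["monitor", "surveillance", "watch", "alert"]):
--         return "security_monitoring"
--     elif any(word in content_lower for word in ["risk", "assess", "evaluation", "analysis"]):
--         return "risk_assessment"
--     else:
--         return "general_security_work"
-- ===== SOURCE B (Python) =====
-- # Flat word->priority map; one min-aggregation pass instead of a first-match ladder.
-- _WORD_PRIORITY = {
--     "threat": 0, "attack": 0, "malware": 0, "intrusion": 0,
--     "vulnerability": 1, "weakness": 1, "flaw": 1, "exploit": 1,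
--     "access": 2, "permission": 2, "authorization": 2, "authentication": 2,
--     "compliance": 3, "regulation": 3, "standard": 3, "audit": 3,
--     "incident": 4, "breach": 4, "emergency": 4, "response": 4,
--     "monitor": 5, "surveillance": 5, "watch": 5, "alert": 5,
--     "risk": 6, "assess": 6, "evaluation": 6, "analysis": 6,
-- }
--
-- _ACTIONS = [
--     "threat_detection", "vulnerability_assessment", "access_control",
--     "compliance_check", "incident_response", "security_monitoring",
--     "risk_assessment", "general_security_work",
-- ]
--
--
-- def _determine_security_action(content: str) -> str:
--     """Determine the specific security action needed"""
--     content_lower = content.lower()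
--     best = len(_ACTIONS) - 1  # default: general_security_work
--     for word, prio in _WORD_PRIORITY.items():
--         if word in content_lower:
--             best = min(best, prio)
--     return _ACTIONS[best]
-- ===== Notes on version B (the rewrite author's own statement) =====
-- stated objective: alternative
-- what changed: Replaced the first-match if/elif ladder over grouped keyword lists by a single min-aggregation fold over a flat word-to-priority map, followed by indexing a label array with the minimum matched priority.
import Mathlib
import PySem

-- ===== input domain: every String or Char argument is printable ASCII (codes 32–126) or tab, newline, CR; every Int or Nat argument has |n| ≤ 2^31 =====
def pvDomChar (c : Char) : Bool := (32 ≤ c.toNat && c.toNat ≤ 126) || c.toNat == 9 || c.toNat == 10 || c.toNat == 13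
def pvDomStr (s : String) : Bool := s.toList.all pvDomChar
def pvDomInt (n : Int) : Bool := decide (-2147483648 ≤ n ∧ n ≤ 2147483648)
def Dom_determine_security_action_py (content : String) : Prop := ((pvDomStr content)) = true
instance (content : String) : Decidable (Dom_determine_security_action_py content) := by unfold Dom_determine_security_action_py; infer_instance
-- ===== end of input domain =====

-- B replaces A's first-match if/elif ladder by a min-aggregation fold over a flat word->priority map plus a label-array lookup (alternative decomposition, same cost).

-- ===== PORT A =====
def determine_security_action_py (content : String) : String :=
  let content_lower := PySem.Str.lower content
  if (["threat", "attack", "malware", "intrusion"] : List String).any (fun word => PySem.Str.isIn word content_lower) then "threat_detection"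
  else if (["vulnerability", "weakness", "flaw", "exploit"] : List String).any (fun word => PySem.Str.isIn word content_lower) then "vulnerability_assessment"
  else if (["access", "permission", "authorization", "authentication"] : List String).any (fun word => PySem.Str.isIn word content_lower) then "access_control"
  else if (["compliance", "regulation", "standard", "audit"] : List String).any (fun word => PySem.Str.isIn word content_lower) then "compliance_check"
  else if (["incident", "breach", "emergency", "response"] : List String).any (fun word => PySem.Str.isIn word content_lower) then "incident_response"
  else if (["monitor", "surveillance", "watch", "alert"] : List String).any (fun word => PySem.Str.isIn word content_lower) then "security_monitoring"
  else if (["risk", "assess", "evaluation", "analysis"] : List String).any (fun word => PySem.Str.isIn word content_lower) then "risk_assessment"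
  else "general_security_work"

-- ===== PORT B =====
-- flat word -> priority association list (dict in insertion order)
def wordPriority : List (String × Nat) :=
  [ ("threat", 0), ("attack", 0), ("malware", 0), ("intrusion", 0),
    ("vulnerability", 1), ("weakness", 1), ("flaw", 1), ("exploit", 1),
    ("access", 2), ("permission", 2), ("authorization", 2), ("authentication", 2),
    ("compliance", 3), ("regulation", 3), ("standard", 3), ("audit", 3),
    ("incident", 4), ("breach", 4), ("emergency", 4), ("response", 4),
    ("monitor", 5), ("surveillance", 5), ("watch", 5), ("alert", 5),
    ("risk", 6), ("assess", 6), ("evaluation", 6), ("analysis", 6) ]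

def securityActions : List String :=
  [ "threat_detection", "vulnerability_assessment", "access_control",
    "compliance_check", "incident_response", "security_monitoring",
    "risk_assessment", "general_security_work" ]

def determine_security_action_py_alt (content : String) : String :=
  let content_lower := PySem.Str.lower content
  let best := wordPriority.foldl
    (fun best wp => if PySem.Str.isIn wp.1 content_lower then min best wp.2 else best)
    (securityActions.length - 1)
  (PySem.List.pyGet? securityActions (Int.ofNat best)).getD ""

-- ===== PRECONDITION & SPEC =====
def Spec_determine_security_action_py (content : String) (out : String) : Prop := out = determine_security_action_py_alt content
instance (content : String) (out : String) : Decidable (Spec_determine_security_action_py content out) := by unfold Spec_determine_security_action_py; infer_instance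

-- ===== CLAIM (what is proved, stated in full; the proofs are below) =====
def Claim_equal_determine_security_action_py : Prop := ∀ (content : String), Dom_determine_security_action_py content → Spec_determine_security_action_py content (determine_security_action_py content)

-- ===== LEMMAS AND PROOFS =====

-- Folding the min-update over one priority group (all words share priority i)
-- collapses to a single conditional min on whether any word of the group matches.
theorem foldl_min_group (cl : String) (ws : List String) (i best : Nat) :
    (ws.map (fun w => (w, i))).foldl
      (fun best wp => if PySem.Str.isIn wp.1 cl then min best wp.2 else best) best
    = if ws.any (fun word => PySem.Str.isIn word cl) then min best i else best := by
  induction ws generalizing best with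
  | nil => simp
  | cons w rest ih =>
    cases h : PySem.Str.isIn w cl <;>
      simp only [List.map_cons, List.foldl_cons, List.any_cons, h, Bool.false_or, Bool.true_or,
        Bool.false_eq_true, if_true, if_false, ih] <;>
      split <;> omega

theorem determine_security_action_py_spec' (content : String) :
    determine_security_action_py content = determine_security_action_py_alt content := by
  unfold determine_security_action_py determine_security_action_py_alt
  have hsplit : wordPriority =
      (["threat", "attack", "malware", "intrusion"] : List String).map (fun w => (w, 0)) ++
      (["vulnerability", "weakness", "flaw", "exploit"] : List String).map (fun w => (w, 1)) ++
      (["access", "permission", "authorization", "authentication"] : List String).map (fun w => (w, 2)) ++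
      (["compliance", "regulation", "standard", "audit"] : List String).map (fun w => (w, 3)) ++
      (["incident", "breach", "emergency", "response"] : List String).map (fun w => (w, 4)) ++
      (["monitor", "surveillance", "watch", "alert"] : List String).map (fun w => (w, 5)) ++
      (["risk", "assess", "evaluation", "analysis"] : List String).map (fun w => (w, 6)) := rfl
  rw [hsplit]
  simp only [List.foldl_append, foldl_min_group]
  generalize (["threat", "attack", "malware", "intrusion"] : List String).any (fun word => PySem.Str.isIn word (PySem.Str.lower content)) = b0
  generalize (["vulnerability", "weakness", "flaw", "exploit"] : List String).any (fun word => PySem.Str.isIn word (PySem.Str.lower content)) = b1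
  generalize (["access", "permission", "authorization", "authentication"] : List String).any (fun word => PySem.Str.isIn word (PySem.Str.lower content)) = b2
  generalize (["compliance", "regulation", "standard", "audit"] : List String).any (fun word => PySem.Str.isIn word (PySem.Str.lower content)) = b3
  generalize (["incident", "breach", "emergency", "response"] : List String).any (fun word => PySem.Str.isIn word (PySem.Str.lower content)) = b4
  generalize (["monitor", "surveillance", "watch", "alert"] : List String).any (fun word => PySem.Str.isIn word (PySem.Str.lower content)) = b5
  generalize (["risk", "assess", "evaluation", "analysis"] : List String).any (fun word => PySem.Str.isIn word (PySem.Str.lower content)) = b6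
  revert b0 b1 b2 b3 b4 b5 b6
  decide

-- ===== VERDICT (by name: the statement is the Claim_ definition above) =====
theorem determine_security_action_py_spec : Claim_equal_determine_security_action_py := by
  intro content _
  exact determine_security_action_py_spec' content
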